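-- pv_equiv track=rewrite | github.com/mete0r/hypua2jamo | src/hypua2jamo-c/data2c.py | table_to_header
-- ===== SOURCE A (Python) =====
-- def table_to_header(table):
--     pua_groups = make_groups(sorted(table.keys()))
--
--     for pua_start, pua_end in pua_groups:
--         for pua_code in range(pua_start, pua_end + 1):
--             jamo = table[pua_code]
--
--             codepoints = ', '.join(
--                 ['0x{:04X}'.format(len(jamo))] +
--                 ['0x{:04x}'.format(ord(uch)) for uch in jamo]
--             )
--             yield 'static const codepoint_t pua2jamo_{:04X}[] = {{ {} }};'.format(  # noqa
--                 pua_code, codepoints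
--             )
--
--         yield 'static const codepoint_t *pua2jamo_group_{:04X}[] = {{'.format(
--             pua_start,
--         )
--         for pua_code in range(pua_start, pua_end + 1):
--             yield '\tpua2jamo_{:04X},'.format(pua_code)
--         yield '};'
--
--     yield '#define lookup(code) \\'
--     for pua_start, pua_end in pua_groups:
--         yield (
--             '\t(0x{start:04X} <= code && code <= 0x{end:04X})?'
--             '(pua2jamo_group_{start:04X}[code - 0x{start:04X}]): \\'.format(
--                 start=pua_start,
--                 end=pua_end
--             )
--         )
--     yield '\tNULL'
--
-- def make_groups(codes):
--     groups = []
--     current_group = None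
--     for code in codes:
--         if current_group is None:
--             current_group = [code, code]
--         elif current_group[-1] + 1 == code:
--             current_group[-1] = code
--         else:
--             groups.append(current_group)
--             current_group = [code, code]
--
--     if current_group is not None:
--         groups.append(current_group)
--
--     return groups
-- ===== SOURCE B (Python) =====
-- def _group_block(start, end):
--     return (['static const codepoint_t *pua2jamo_group_{:04X}[] = {{'.format(start)] +
--             ['\tpua2jamo_{:04X},'.format(c) for c in range(start, end + 1)] +
--             ['};'])
--
--
-- def table_to_header(table):
--     # Single fused pass over the sorted keys: emit each entry line immediately,
--     # flush a group block whenever a consecutive run ends, collect (start, end)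
--     # pairs for the final lookup macro.  No separate make_groups pre-pass.
--     out = []
--     groups = []
--     start = prev = None
--     for code in sorted(table.keys()):
--         if start is not None and prev + 1 != code:
--             out.extend(_group_block(start, prev))
--             groups.append((start, prev))
--             start = code
--         elif start is None:
--             start = code
--         jamo = table[code]
--         codepoints = ', '.join(
--             ['0x{:04X}'.format(len(jamo))] +
--             ['0x{:04x}'.format(ord(uch)) for uch in jamo]
--         )
--         out.append(
--             'static const codepoint_t pua2jamo_{:04X}[] = {{ {} }};'.format(
--                 code, codepoints))
--         prev = code
--     if start is not None:
--         out.extend(_group_block(start, prev))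
--         groups.append((start, prev))
--     out.append('#define lookup(code) \\')
--     for s, e in groups:
--         out.append(
--             '\t(0x{start:04X} <= code && code <= 0x{end:04X})?'
--             '(pua2jamo_group_{start:04X}[code - 0x{start:04X}]): \\'.format(
--                 start=s, end=e))
--     out.append('\tNULL')
--     return out
-- ===== Notes on version B (the rewrite author's own statement) =====
-- stated objective: alternative
-- what changed: B drops the separate make_groups pre-pass and fuses grouping and emission into one pass over the sorted keys: it emits each entry line as the key is visited, flushes a group block when a consecutive run ends, and collects (start,end) pairs on the fly for the final lookup macro.
import Mathlib
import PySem

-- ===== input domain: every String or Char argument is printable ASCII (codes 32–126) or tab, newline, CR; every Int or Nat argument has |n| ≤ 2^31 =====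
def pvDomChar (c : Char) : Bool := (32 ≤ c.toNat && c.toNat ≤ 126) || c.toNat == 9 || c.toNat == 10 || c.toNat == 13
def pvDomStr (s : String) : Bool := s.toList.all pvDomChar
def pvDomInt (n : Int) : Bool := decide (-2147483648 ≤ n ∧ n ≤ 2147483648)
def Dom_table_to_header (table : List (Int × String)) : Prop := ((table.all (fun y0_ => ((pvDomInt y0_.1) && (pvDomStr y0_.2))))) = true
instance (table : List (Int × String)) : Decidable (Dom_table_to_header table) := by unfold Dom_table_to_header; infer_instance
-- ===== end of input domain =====

-- B fuses make_groups and the emission into one pass over the sorted keys (objective: alternative decomposition, same cost).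

-- ===== PORT A =====
-- shared formatting helpers (exact ports of Python's '{:04X}'.format / '{:04x}'.format,
-- including the sign-inside-padding behaviour on negative ints; hand-written because
-- PySem has no hex formatter)
def hexDigit (upper : Bool) (n : Nat) : Char :=
  if n < 10 then Char.ofNat (48 + n)
  else Char.ofNat ((if upper then 55 else 87) + n)

def hexChars (upper : Bool) (n : Nat) : List Char :=
  if _h : n < 16 then [hexDigit upper n]
  else hexChars upper (n / 16) ++ [hexDigit upper (n % 16)]
  decreasing_by exact Nat.div_lt_self (by omega) (by omega)

-- format(n, '04X') / format(n, '04x'): zero-pad to total width 4, sign counted in the width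
def fmt04 (upper : Bool) (n : Int) : String :=
  if n < 0 then
    String.ofList ('-' :: (List.replicate (3 - (hexChars upper (-n).toNat).length) '0' ++ hexChars upper (-n).toNat))
  else
    String.ofList (List.replicate (4 - (hexChars upper n.toNat).length) '0' ++ hexChars upper n.toNat)

-- one 'static const codepoint_t pua2jamo_XXXX[] = { … };' line
def entryLine (code : Int) (jamo : String) : String :=
  let codepoints := String.intercalate ", "
    (("0x" ++ fmt04 true (PySem.Str.len jamo)) ::
      jamo.toList.map (fun uch => "0x" ++ fmt04 false (uch.toNat : Int)))
  "static const codepoint_t pua2jamo_" ++ fmt04 true code ++ "[] = { " ++ codepoints ++ " };"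

def ptrLine (code : Int) : String := "\tpua2jamo_" ++ fmt04 true code ++ ","

def groupHdr (start : Int) : String :=
  "static const codepoint_t *pua2jamo_group_" ++ fmt04 true start ++ "[] = {"

def macroLine (start stop : Int) : String :=
  "\t(0x" ++ fmt04 true start ++ " <= code && code <= 0x" ++ fmt04 true stop ++
    ")?(pua2jamo_group_" ++ fmt04 true start ++ "[code - 0x" ++ fmt04 true start ++ "]): \\"

-- make_groups: loop of A's helper (current_group as Option (start, end))
def makeGroupsLoop : List Int → List (Int × Int) → Option (Int × Int) → List (Int × Int)
  | [], groups, none => groups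
  | [], groups, some g => groups ++ [g]
  | c :: cs, groups, none => makeGroupsLoop cs groups (some (c, c))
  | c :: cs, groups, some (s, p) =>
      if p + 1 = c then makeGroupsLoop cs groups (some (s, c))
      else makeGroupsLoop cs (groups ++ [(s, p)]) (some (c, c))

def make_groups (codes : List Int) : List (Int × Int) := makeGroupsLoop codes [] none

def table_to_header (table : List (Int × String)) : List String :=
  let d := PySem.Dict.ofList table
  let pua_groups := make_groups (PySem.List.sorted d.keys (fun x => x) false)
  (pua_groups.flatMap (fun g =>
      (PySem.List.pyRange g.1 (g.2 + 1) 1).map (fun c => entryLine c (d.getD c ""))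
      ++ [groupHdr g.1]
      ++ (PySem.List.pyRange g.1 (g.2 + 1) 1).map ptrLine
      ++ ["};"]))
  ++ ["#define lookup(code) \\"]
  ++ pua_groups.map (fun g => macroLine g.1 g.2)
  ++ ["\tNULL"]

-- ===== PORT B =====
-- _group_block helper of Source B
def groupBlock (start stop : Int) : List String :=
  groupHdr start :: ((PySem.List.pyRange start (stop + 1) 1).map ptrLine ++ ["};"])

-- Source B's single fused loop: state = (out, groups, current run as Option (start, prev))
def bLoop (d : PySem.Dict Int String) :
    List Int → List String → List (Int × Int) → Option (Int × Int) → List String × List (Int × Int)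
  | [], out, groups, none => (out, groups)
  | [], out, groups, some (s, p) => (out ++ groupBlock s p, groups ++ [(s, p)])
  | c :: cs, out, groups, some (s, p) =>
      if p + 1 ≠ c then
        bLoop d cs (out ++ groupBlock s p ++ [entryLine c (d.getD c "")]) (groups ++ [(s, p)]) (some (c, c))
      else
        bLoop d cs (out ++ [entryLine c (d.getD c "")]) groups (some (s, c))
  | c :: cs, out, groups, none =>
      bLoop d cs (out ++ [entryLine c (d.getD c "")]) groups (some (c, c))

def table_to_header_alt (table : List (Int × String)) : List String :=
  let d := PySem.Dict.ofList table
  let r := bLoop d (PySem.List.sorted d.keys (fun x => x) false) [] [] none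
  r.1 ++ ["#define lookup(code) \\"] ++ r.2.map (fun g => macroLine g.1 g.2) ++ ["\tNULL"]

-- ===== PRECONDITION & SPEC =====
def Spec_table_to_header (table : List (Int × String)) (out : List String) : Prop := out = table_to_header_alt table
instance (table : List (Int × String)) (out : List String) : Decidable (Spec_table_to_header table out) := by unfold Spec_table_to_header; infer_instance

-- ===== CLAIM (what is proved, stated in full; the proofs are below) =====
def Claim_equal_table_to_header : Prop := ∀ (table : List (Int × String)), Dom_table_to_header table → Spec_table_to_header table (table_to_header table)

-- ===== LEMMAS AND PROOFS =====

-- entry lines for the codes of one finished group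
def entRange (d : PySem.Dict Int String) (s e : Int) : List String :=
  (PySem.List.pyRange s (e + 1) 1).map (fun c => entryLine c (d.getD c ""))

-- what B's loop still emits from state (s, p) on the remaining codes
def tailEmit (d : PySem.Dict Int String) : List Int → Int → Int → List String
  | [], s, p => groupBlock s p
  | c :: cs, s, p =>
      if p + 1 = c then entryLine c (d.getD c "") :: tailEmit d cs s c
      else groupBlock s p ++ entryLine c (d.getD c "") :: tailEmit d cs c c

theorem makeGroupsLoop_acc (cs : List Int) (groups : List (Int × Int)) (cur : Option (Int × Int)) :
    makeGroupsLoop cs groups cur = groups ++ makeGroupsLoop cs [] cur := by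
  induction cs generalizing groups cur with
  | nil => cases cur <;> simp [makeGroupsLoop]
  | cons c cs ih =>
      cases cur with
      | none => simp only [makeGroupsLoop]; exact ih groups _
      | some g =>
          obtain ⟨s, p⟩ := g
          by_cases h : p + 1 = c
          · simp only [makeGroupsLoop, if_pos h]; exact ih groups _
          · simp only [makeGroupsLoop, if_neg h]
            rw [ih (groups ++ [(s, p)]), ih ([] ++ [(s, p)])]
            simp

theorem bLoop_emit (d : PySem.Dict Int String) (cs : List Int) :
    ∀ (s p : Int) (out : List String) (groups : List (Int × Int)),
      bLoop d cs out groups (some (s, p)) =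
        (out ++ tailEmit d cs s p, makeGroupsLoop cs groups (some (s, p))) := by
  induction cs with
  | nil => intro s p out groups; simp [bLoop, tailEmit, makeGroupsLoop]
  | cons c cs ih =>
      intro s p out groups
      by_cases h : p + 1 = c
      · simp [bLoop, tailEmit, makeGroupsLoop, h, ih]
      · simp [bLoop, tailEmit, makeGroupsLoop, h, ih]

-- A's emission of the remaining groups equals B's tailEmit, given the run
-- invariant s ≤ p (the entries for s..p are already emitted by B).
theorem flatMap_makeGroups_eq_tailEmit (d : PySem.Dict Int String) (cs : List Int) :
    ∀ (s p : Int), s ≤ p →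
      ((makeGroupsLoop cs [] (some (s, p))).flatMap (fun g => entRange d g.1 g.2 ++ groupBlock g.1 g.2))
        = entRange d s p ++ tailEmit d cs s p := by
  induction cs with
  | nil =>
      intro s p _
      simp [makeGroupsLoop, tailEmit]
  | cons c cs ih =>
      intro s p hsp
      by_cases h : p + 1 = c
      · have hr : entRange d s c = entRange d s p ++ [entryLine c (d.getD c "")] := by
          have : PySem.List.pyRange s (c + 1) 1 = PySem.List.pyRange s (p + 1) 1 ++ [p + 1] := by
            rw [← h]
            exact PySem.List.pyRange_one_succ_right (by omega)
          simp [entRange, this, h]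
        rw [makeGroupsLoop, if_pos h, ih s c (by omega), hr, tailEmit, if_pos h]
        simp
      · have hr : entRange d c c = [entryLine c (d.getD c "")] := by
          simp [entRange, PySem.List.pyRange_one_singleton]
        rw [makeGroupsLoop, if_neg h, makeGroupsLoop_acc, List.flatMap_append,
          ih c c le_rfl, hr, tailEmit, if_neg h]
        simp [entRange]

theorem table_to_header_spec : Claim_equal_table_to_header := by
  intro table _
  unfold Spec_table_to_header table_to_header table_to_header_alt make_groups
  simp only []
  cases hk : PySem.List.sorted (PySem.Dict.ofList table).keys (fun x => x) false with
  | nil => simp [makeGroupsLoop, bLoop]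
  | cons c cs =>
      have h1 : makeGroupsLoop (c :: cs) [] none = makeGroupsLoop cs [] (some (c, c)) := rfl
      have h2 : bLoop (PySem.Dict.ofList table) (c :: cs) [] [] none
          = bLoop (PySem.Dict.ofList table) cs
              ([] ++ [entryLine c ((PySem.Dict.ofList table).getD c "")]) [] (some (c, c)) := rfl
      rw [h1, h2, bLoop_emit]
      have hE := flatMap_makeGroups_eq_tailEmit (PySem.Dict.ofList table) cs c c le_rfl
      have hr : entRange (PySem.Dict.ofList table) c c
          = [entryLine c ((PySem.Dict.ofList table).getD c "")] := by
        simp [entRange, PySem.List.pyRange_one_singleton]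
      rw [hr] at hE
      simp only [entRange, groupBlock] at hE
      simp [hE]
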